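-- pv_equiv track=rewrite | github.com/racinmat/advent_of_code_2018 | day_5/main.py | shorten_sequence
-- ===== SOURCE A (Python) =====
-- def invert(char: str):
--     return char.upper() if char.islower() else char.lower()
--
-- def shorten_sequence(sequence: str):
--     stack = []
--     for char in sequence:
--         if stack:  # empty check
--             if char == invert(stack[-1]):
--                 stack.pop()
--             else:
--                 stack.append(char)
--         else:
--             stack.append(char)
--     return ''.join(stack)
-- ===== SOURCE B (Python) =====
-- def invert(char: str):
--     return char.upper() if char.islower() else char.lower()
--
-- def shorten_sequence(sequence: str):
--     # Repeatedly scan left-to-right removing adjacent case-opposite pairs until a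
--     # full pass removes nothing (fixpoint); confluence gives the stack-pass result.
--     s = sequence
--     while True:
--         out = []
--         i = 0
--         n = len(s)
--         while i < n:
--             if i + 1 < n and s[i + 1] == invert(s[i]):
--                 i += 2
--             else:
--                 out.append(s[i])
--                 i += 1
--         t = ''.join(out)
--         if len(t) == len(s):
--             return s
--         s = t
-- ===== Notes on version B (the rewrite author's own statement) =====
-- stated objective: alternative
-- what changed: Replaces the single O(n) stack pass with repeated left-to-right scanning passes that each remove adjacent case-opposite pairs, iterated to a fixpoint; equality follows from confluence of the reduction.
import Mathlib
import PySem

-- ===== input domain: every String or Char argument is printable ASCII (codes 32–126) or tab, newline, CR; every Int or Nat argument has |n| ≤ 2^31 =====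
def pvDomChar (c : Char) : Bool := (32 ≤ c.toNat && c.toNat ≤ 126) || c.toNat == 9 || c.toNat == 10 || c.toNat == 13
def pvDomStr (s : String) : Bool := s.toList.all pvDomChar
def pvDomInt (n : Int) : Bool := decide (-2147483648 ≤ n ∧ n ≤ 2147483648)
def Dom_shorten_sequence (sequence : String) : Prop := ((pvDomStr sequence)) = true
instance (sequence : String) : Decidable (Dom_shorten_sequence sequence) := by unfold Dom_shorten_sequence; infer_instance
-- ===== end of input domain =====

-- B replaces A's single stack pass by repeated scanning passes iterated to a fixpoint (alternative algorithm, not faster).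

-- ===== PORT A =====
-- invert: char.upper() if char.islower() else char.lower()
def invert (c : Char) : Char :=
  if PySem.Chars.islower c then PySem.Chars.upperChar c else PySem.Chars.lowerChar c

-- one iteration of A's for-loop; the stack is kept top-at-head (Python's stack[-1] = head,
-- pop = tail, append = cons), so the final join reverses it back to Python order
def pushA (stack : List Char) (c : Char) : List Char :=
  match stack with
  | [] => [c]
  | t :: rest => if c = invert t then rest else c :: t :: rest

def shorten_sequence (sequence : String) : String :=
  String.mk (sequence.toList.foldl pushA []).reverse

-- ===== PORT B =====
-- one left-to-right scan: skip a pair whenever s[i+1] == invert(s[i])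
def onePass : List Char → List Char
  | a :: b :: rest => if b = invert a then onePass rest else a :: onePass (b :: rest)
  | xs => xs

-- the while-True loop: repeat while the pass shrinks the string
def fixLoop (s : List Char) : List Char :=
  if _h : (onePass s).length < s.length then fixLoop (onePass s) else s
termination_by s.length

def shorten_sequence_alt (sequence : String) : String :=
  String.mk (fixLoop sequence.toList)

-- ===== PRECONDITION & SPEC =====
def Spec_shorten_sequence (sequence : String) (out : String) : Prop := out = shorten_sequence_alt sequence
instance (sequence : String) (out : String) : Decidable (Spec_shorten_sequence sequence out) := by unfold Spec_shorten_sequence; infer_instance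

-- ===== CLAIM (what is proved, stated in full; the proofs are below) =====
def Claim_equal_shorten_sequence : Prop := ∀ (sequence : String), Dom_shorten_sequence sequence → Spec_shorten_sequence sequence (shorten_sequence sequence)

-- ===== LEMMAS AND PROOFS =====

theorem char_le_iff (a b : Char) : (a ≤ b) ↔ a.toNat ≤ b.toNat := by
  rw [Char.le_def]; exact UInt32.le_iff_toNat_le ..

theorem char_ext' {a b : Char} (h : a.toNat = b.toNat) : a = b :=
  Char.ext (UInt32.toNat_inj.mp h)

theorem invert_invert (c : Char) : invert (invert c) = c := by
  have hA : ('A' : Char).toNat = 65 := rfl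
  have hZ : ('Z' : Char).toNat = 90 := rfl
  have ha : ('a' : Char).toNat = 97 := rfl
  have hz : ('z' : Char).toNat = 122 := rfl
  simp only [invert, PySem.Chars.islower, PySem.Chars.upperChar, PySem.Chars.lowerChar,
    PySem.Chars.isupper, Bool.and_eq_true, decide_eq_true_eq, char_le_iff, hA, hZ, ha, hz]
  by_cases hl : 97 ≤ c.toNat ∧ c.toNat ≤ 122
  · have hval : (c.toNat - 32).isValidChar := Or.inl (by omega)
    have ht : (Char.ofNat (c.toNat - 32)).toNat = c.toNat - 32 := by
      rw [Char.toNat_ofNat, if_pos hval]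
    simp only [if_pos hl, ht]
    rw [if_neg (by omega), if_pos (by omega)]
    apply char_ext'
    rw [Char.toNat_ofNat, if_pos (Or.inl (by omega))]
    omega
  · rw [if_neg hl]
    by_cases hu : 65 ≤ c.toNat ∧ c.toNat ≤ 90
    · have ht : (Char.ofNat (c.toNat + 32)).toNat = c.toNat + 32 := by
        rw [Char.toNat_ofNat, if_pos (Or.inl (by omega))]
      rw [if_pos hu]
      apply char_ext'
      simp only [ht]
      split_ifs with h2
      · rw [Char.toNat_ofNat, if_pos (Or.inl (show c.toNat + 32 - 32 < 0xd800 by omega))]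
        omega
      all_goals omega
    · rw [if_neg hu, if_neg hl, if_neg hu]

-- the stack never holds an adjacent cancelling pair (top-at-head order)
def Irr : List Char → Prop
  | t :: u :: rest => t ≠ invert u ∧ Irr (u :: rest)
  | _ => True

-- a string with no adjacent cancelling pair (left-to-right order)
def NoPair : List Char → Prop
  | a :: b :: rest => b ≠ invert a ∧ NoPair (b :: rest)
  | _ => True

theorem irr_pushA {st : List Char} (h : Irr st) (c : Char) : Irr (pushA st c) := by
  match st with
  | [] => simp only [pushA, Irr]
  | t :: rest =>
    simp only [pushA.eq_def]
    split_ifs with hc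
    · match rest with
      | [] => trivial
      | u :: r => exact h.2
    · exact ⟨hc, h⟩

theorem pushA_cancel {st : List Char} (h : Irr st) (a : Char) :
    pushA (pushA st a) (invert a) = st := by
  match st with
  | [] => simp [pushA]
  | t :: rest =>
    simp only [pushA]
    split_ifs with hc
    · subst hc
      rw [invert_invert]
      match rest with
      | [] => rfl
      | u :: r =>
        exact if_neg h.1
    · simp

theorem foldl_onePass (xs : List Char) :
    ∀ st : List Char, Irr st → List.foldl pushA st (onePass xs) = List.foldl pushA st xs := by
  fun_induction onePass xs with
  | case1 a rest ih =>
    intro st hst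
    rw [ih st hst]
    simp only [List.foldl_cons]
    rw [pushA_cancel hst]
  | case2 a b rest hc ih =>
    intro st hst
    simp only [List.foldl_cons]
    exact ih (pushA st a) (irr_pushA hst a)
  | case3 => intro st _; rfl

theorem onePass_length_le (xs : List Char) : (onePass xs).length ≤ xs.length := by
  fun_induction onePass xs with
  | case1 a rest ih => simp only [List.length_cons]; omega
  | case2 a b rest hc ih => simp only [List.length_cons] at *; omega
  | case3 => exact le_refl _

theorem onePass_eq_or_lt (xs : List Char) :
    onePass xs = xs ∨ (onePass xs).length < xs.length := by
  fun_induction onePass xs with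
  | case1 a rest ih =>
    right
    have := onePass_length_le rest
    simp only [List.length_cons]; omega
  | case2 a b rest hc ih =>
    rcases ih with h | h
    · left; rw [h]
    · right; simp only [List.length_cons] at *; omega
  | case3 => left; rfl

theorem onePass_fix_noPair (xs : List Char) : onePass xs = xs → NoPair xs := by
  fun_induction onePass xs with
  | case1 a rest ih =>
    intro h
    exfalso
    have h1 := onePass_length_le rest
    have h2 := congrArg List.length h
    simp only [List.length_cons] at h2
    omega
  | case2 a b rest hc ih =>
    intro h
    simp only [List.cons.injEq, true_and] at h
    exact ⟨hc, ih h⟩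
  | case3 xs h2 =>
    intro _
    match xs with
    | [] => trivial
    | [a] => trivial
    | a :: b :: r => exact absurd rfl (h2 a b r)

theorem foldl_noPair (ys : List Char) :
    ∀ st : List Char, Irr st →
      (∀ t r, st = t :: r → ∀ y tl, ys = y :: tl → y ≠ invert t) →
      NoPair ys →
      List.foldl pushA st ys = ys.reverse ++ st := by
  induction ys with
  | nil => intro st _ _ _; rfl
  | cons y tl ih =>
    intro st hst hcompat hnp
    have hpush : pushA st y = y :: st := by
      match st with
      | [] => rfl
      | t :: r =>
        exact if_neg (hcompat t r rfl y tl rfl)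
    simp only [List.foldl_cons, hpush]
    have hirr : Irr (y :: st) := by
      match st with
      | [] => trivial
      | t :: r => exact ⟨hcompat t r rfl y tl rfl, hst⟩
    have hcompat' : ∀ t r, y :: st = t :: r → ∀ y' tl', tl = y' :: tl' → y' ≠ invert t := by
      intro t r heq y' tl' htl
      cases heq
      have : NoPair (y :: y' :: tl') := htl ▸ hnp
      exact this.1
    have hnp' : NoPair tl := by
      match tl with
      | [] => trivial
      | b :: r => exact hnp.2
    rw [ih (y :: st) hirr hcompat' hnp']
    simp

theorem foldl_fixLoop (xs : List Char) :
    List.foldl pushA [] xs = (fixLoop xs).reverse := by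
  fun_induction fixLoop xs with
  | case1 s h ih =>
    rw [← ih, foldl_onePass s [] trivial]
  | case2 s h =>
    have hfix : onePass s = s := by
      rcases onePass_eq_or_lt s with h2 | h2
      · exact h2
      · exact absurd h2 h
    have := foldl_noPair s [] trivial (by intro t r h' ; exact absurd h' (by simp))
      (onePass_fix_noPair s hfix)
    rw [this, List.append_nil]

-- ===== VERDICT (by name: the statement is the Claim_ definition above) =====
theorem shorten_sequence_spec : Claim_equal_shorten_sequence := by
  intro sequence _
  unfold Spec_shorten_sequence shorten_sequence shorten_sequence_alt
  rw [foldl_fixLoop, List.reverse_reverse]
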